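-- pv_equiv track=rewrite | github.com/chrismoroney/Advent-of-Code-2023 | Q8/code_part1.py | count_steps
-- ===== SOURCE A (Python) =====
-- def count_steps(instruction, map_of_nodes, num_steps, current):
--     for char in instruction:
--         if current == 'ZZZ':
--             return num_steps
--         else:
--             num_steps += 1
--             if char == 'L':
--                 current = map_of_nodes[current][0]
--             else:
--                 current = map_of_nodes[current][1]
--     return count_steps(instruction, map_of_nodes, num_steps, current)
-- ===== SOURCE B (Python) =====
-- def count_steps(instruction, map_of_nodes, num_steps, current):
--     n = len(instruction)
--     i = 0
--     while current != 'ZZZ':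
--         current = map_of_nodes[current][0 if instruction[i % n] == 'L' else 1]
--         num_steps += 1
--         i += 1
--     return num_steps
-- ===== Notes on version B (the rewrite author's own statement) =====
-- stated objective: idiomatic
-- what changed: Replaces A's tail-recursion (one recursive call per full sweep of the instruction string, with an inner for-loop) by a single flat while-loop that indexes the instruction cyclically with i % len(instruction).
import Mathlib
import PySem

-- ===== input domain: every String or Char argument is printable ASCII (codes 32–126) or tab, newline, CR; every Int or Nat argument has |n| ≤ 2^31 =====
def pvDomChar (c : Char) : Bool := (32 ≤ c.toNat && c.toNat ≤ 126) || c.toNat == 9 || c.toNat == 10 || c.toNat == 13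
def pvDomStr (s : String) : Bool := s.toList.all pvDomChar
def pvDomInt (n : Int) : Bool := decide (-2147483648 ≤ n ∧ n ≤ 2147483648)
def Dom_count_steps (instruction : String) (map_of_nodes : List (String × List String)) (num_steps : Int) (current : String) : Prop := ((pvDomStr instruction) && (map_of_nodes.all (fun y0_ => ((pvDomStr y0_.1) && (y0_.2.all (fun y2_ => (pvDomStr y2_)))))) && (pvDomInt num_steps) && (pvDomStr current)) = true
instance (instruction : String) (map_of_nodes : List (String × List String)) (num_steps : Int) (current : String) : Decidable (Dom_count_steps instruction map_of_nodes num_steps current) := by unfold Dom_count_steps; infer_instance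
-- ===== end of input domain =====

-- B replaces A's tail-recursion (one recursive call per sweep of the instruction, with an inner
-- for-loop) by one flat while-loop indexing the instruction cyclically with i % len (idiomatic).

-- ===== shared helpers =====
-- Python dict lookup on the association list: first matching key (none = KeyError).
def pvLookup (m : List (String × List String)) (k : String) : Option (List String) :=
  (m.find? (fun p => p.1 == k)).map (·.2)

-- step bound: a terminating walk reaches 'ZZZ' within this many steps
-- (states are (node, position); nodes are the start node or stored successors).
def pvSteps (chars : List Char) (m : List (String × List String)) : Nat :=
  chars.length * (2 + (m.map (fun p => p.2.length)).sum)

def pvFuel (chars : List Char) (m : List (String × List String)) : Nat :=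
  pvSteps chars m + 1

-- ===== PORT A =====
-- inner `for char in instruction` loop: inl = early return, inr = fell off the end
def pvLoopA (m : List (String × List String)) : List Char → Int → String → (Int ⊕ (Int × String))
  | [], n, c => Sum.inr (n, c)
  | ch :: rest, n, c =>
    if c = "ZZZ" then Sum.inl n
    else pvLoopA m rest (n + 1)
      (((pvLookup m c).getD []).getD (if ch = 'L' then 0 else 1) "")

-- the tail-recursion of A, made total with fuel (never exhausted under Pre_)
def pvGoA (m : List (String × List String)) (chars : List Char) : Nat → Int → String → Int
  | 0, _, _ => 0
  | fuel + 1, n, c =>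
    match pvLoopA m chars n c with
    | Sum.inl v => v
    | Sum.inr (n', c') => pvGoA m chars fuel n' c'

def count_steps (instruction : String) (map_of_nodes : List (String × List String)) (num_steps : Int) (current : String) : Int :=
  pvGoA map_of_nodes instruction.toList (pvFuel instruction.toList map_of_nodes) num_steps current

-- ===== PORT B =====
-- B's while-loop: check `current != 'ZZZ'`, step via instruction[i % n], made total with fuel
def pvGoB (m : List (String × List String)) (chars : List Char) : Nat → Int → String → Nat → Int
  | 0, _, _, _ => 0
  | fuel + 1, n, c, i =>
    if c = "ZZZ" then n
    else pvGoB m chars fuel (n + 1)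
      (((pvLookup m c).getD []).getD (if chars.getD (i % chars.length) ' ' = 'L' then 0 else 1) "") (i + 1)

def count_steps_alt (instruction : String) (map_of_nodes : List (String × List String)) (num_steps : Int) (current : String) : Int :=
  pvGoB map_of_nodes instruction.toList (pvFuel instruction.toList map_of_nodes) num_steps current 0

-- ===== PRECONDITION & SPEC =====
-- one step of the walk: none = either raised (missing key / short list) or already at 'ZZZ'
def pvIter (m : List (String × List String)) (chars : List Char) : Option (String × Nat) → Option (String × Nat)
  | none => none
  | some (c, i) =>
    if c = "ZZZ" then none
    else match pvLookup m c with
      | none => none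
      | some lst =>
        match lst[(if chars.getD i ' ' = 'L' then 0 else 1)]? with
        | none => none
        | some c' => some (c', (i + 1) % chars.length)

-- one step with 'ZZZ' absorbing (so a single pvSteps-long run decides reachability)
def pvAbs (m : List (String × List String)) (chars : List Char) (st : Option (String × Nat)) : Option (String × Nat) :=
  match st with
  | none => none
  | some (c, i) => if c = "ZZZ" then some (c, i) else pvIter m chars (some (c, i))

-- Pre_: the instruction is nonempty and the walk reaches 'ZZZ' without a missing key or a
-- too-short successor list; exactly where Python A returns (elsewhere it raises
-- KeyError/IndexError or recurses forever into RecursionError).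
def Pre_count_steps (instruction : String) (map_of_nodes : List (String × List String)) (num_steps : Int) (current : String) : Prop :=
  instruction.toList.length ≠ 0 ∧
  ((pvAbs map_of_nodes instruction.toList)^[pvSteps instruction.toList map_of_nodes]
      (some (current, 0))).elim false (fun p => p.1 == "ZZZ") = true
instance (instruction : String) (map_of_nodes : List (String × List String)) (num_steps : Int) (current : String) : Decidable (Pre_count_steps instruction map_of_nodes num_steps current) := by unfold Pre_count_steps; infer_instance

def pvWitness_count_steps : String × (List (String × List String)) × Int × String :=
  ("LR", [("AAA", ["BBB", "AAA"]), ("BBB", ["AAA", "ZZZ"]), ("ZZZ", ["ZZZ", "ZZZ"])], 0, "AAA")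

def Spec_count_steps (instruction : String) (map_of_nodes : List (String × List String)) (num_steps : Int) (current : String) (out : Int) : Prop := out = count_steps_alt instruction map_of_nodes num_steps current
instance (instruction : String) (map_of_nodes : List (String × List String)) (num_steps : Int) (current : String) (out : Int) : Decidable (Spec_count_steps instruction map_of_nodes num_steps current out) := by unfold Spec_count_steps; infer_instance

-- ===== CLAIM (what is proved, stated in full; the proofs are below) =====
def Claim_equal_count_steps : Prop := ∀ (instruction : String) (map_of_nodes : List (String × List String)) (num_steps : Int) (current : String), Dom_count_steps instruction map_of_nodes num_steps current → Pre_count_steps instruction map_of_nodes num_steps current → Spec_count_steps instruction map_of_nodes num_steps current (count_steps instruction map_of_nodes num_steps current)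

-- ===== LEMMAS AND PROOFS =====

-- the walk from st reaches 'ZZZ' after exactly k valid steps
def pvReach (m : List (String × List String)) (chars : List Char) (k : Nat) (st : String × Nat) : Bool :=
  ((pvIter m chars)^[k] (some st)).elim false (fun p => p.1 == "ZZZ")

theorem pvReach_zero (m : List (String × List String)) (chars : List Char) (c : String) (i : Nat) :
    pvReach m chars 0 (c, i) = true ↔ c = "ZZZ" := by
  simp [pvReach]

theorem pvIter_none (m : List (String × List String)) (chars : List Char) (k : Nat) :
    (pvIter m chars)^[k] none = none :=
  Function.iterate_fixed rfl k

theorem pvReach_succ (m : List (String × List String)) (chars : List Char) (j : Nat)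
    (c : String) (i : Nat) (h : pvReach m chars (j + 1) (c, i) = true) :
    c ≠ "ZZZ" ∧ ∃ st', pvIter m chars (some (c, i)) = some st' ∧ pvReach m chars j st' = true := by
  unfold pvReach at h
  rw [Function.iterate_succ_apply] at h
  cases hit : pvIter m chars (some (c, i)) with
  | none => rw [hit, pvIter_none] at h; simp at h
  | some st' =>
    refine ⟨?_, st', rfl, by unfold pvReach; rw [hit] at h; exact h⟩
    intro hz
    simp [pvIter, hz] at hit

-- a successful pvIter step determines the total-function step the ports compute
theorem pvIter_step (m : List (String × List String)) (chars : List Char) (c : String)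
    (i : Nat) (st' : String × Nat) (h : pvIter m chars (some (c, i)) = some st')
    (hz : c ≠ "ZZZ") :
    st' = (((pvLookup m c).getD []).getD (if chars.getD i ' ' = 'L' then 0 else 1) "",
           (i + 1) % chars.length) := by
  simp only [pvIter] at h
  rw [if_neg hz] at h
  cases hl : pvLookup m c with
  | none => rw [hl] at h; simp at h
  | some lst =>
    rw [hl] at h
    have h' : (match lst[(if chars.getD i ' ' = 'L' then 0 else 1)]? with
        | none => (none : Option (String × Nat))
        | some c' => some (c', (i + 1) % chars.length)) = some st' := h
    cases hg : lst[(if chars.getD i ' ' = 'L' then 0 else 1)]? with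
    | none => rw [hg] at h'; simp at h'
    | some c' =>
      rw [hg] at h'
      rw [← Option.some.injEq] at h'
      cases h'
      simp only [Option.getD_some, List.getD]
      exact congrArg (fun o => ((Option.getD o ""), (i + 1) % chars.length)) hg.symm

theorem mod_succ_mod (i L : Nat) : (i + 1) % L = (i % L + 1) % L := by
  rw [Nat.add_mod i 1 L, Nat.add_mod (i % L) 1 L, Nat.mod_mod_of_dvd i (dvd_refl L)]

-- B's loop counts exactly the distance to 'ZZZ'
theorem pvGoB_eq (m : List (String × List String)) (chars : List Char)
    (hL : chars.length ≠ 0) :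
    ∀ (j fuel : Nat) (c : String) (i : Nat) (n : Int), j < fuel →
      pvReach m chars j (c, i % chars.length) = true →
      pvGoB m chars fuel n c i = n + (j : Int) := by
  intro j
  induction j with
  | zero =>
    intro fuel c i n hf hr
    obtain ⟨fuel, rfl⟩ : ∃ f, fuel = f + 1 := ⟨fuel - 1, by omega⟩
    rw [(pvReach_zero m chars c _).1 hr]
    simp [pvGoB]
  | succ j ih =>
    intro fuel c i n hf hr
    obtain ⟨fuel, rfl⟩ : ∃ f, fuel = f + 1 := ⟨fuel - 1, by omega⟩
    obtain ⟨hz, st', hit, hr'⟩ := pvReach_succ m chars j c _ hr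
    have hst := pvIter_step m chars c _ st' hit hz
    have : pvGoB m chars (fuel + 1) n c i
        = pvGoB m chars fuel (n + 1)
            (((pvLookup m c).getD []).getD (if chars.getD (i % chars.length) ' ' = 'L' then 0 else 1) "") (i + 1) := by
      simp [pvGoB, hz]
    rw [hst] at hr'
    rw [this, ih fuel _ (i + 1) (n + 1) (by omega) (by rwa [mod_succ_mod])]
    push_cast; ring

-- A's inner loop, from position i, either returns early (short distance) or falls off the end
theorem pvLoopA_eq (m : List (String × List String)) (chars : List Char)
    (hL : chars.length ≠ 0) :
    ∀ (d i : Nat), i + d = chars.length →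
    ∀ (j : Nat) (c : String) (n : Int),
      pvReach m chars j (c, i % chars.length) = true →
      (j < d → pvLoopA m (chars.drop i) n c = Sum.inl (n + (j : Int))) ∧
      (d ≤ j → ∃ c', pvLoopA m (chars.drop i) n c = Sum.inr (n + (d : Int), c') ∧
        pvReach m chars (j - d) (c', 0) = true) := by
  intro d
  induction d with
  | zero =>
    intro i hi j c n hr
    have hi' : i = chars.length := by omega
    subst hi'
    refine ⟨by omega, fun _ => ⟨c, ?_, ?_⟩⟩
    · simp [List.drop_length, pvLoopA]
    · rw [Nat.mod_self] at hr; simpa using hr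
  | succ d ih =>
    intro i hi j c n hr
    have hiL : i < chars.length := by omega
    have hdrop : chars.drop i = chars[i] :: chars.drop (i + 1) :=
      List.drop_eq_getElem_cons hiL
    by_cases hz : c = "ZZZ"
    · have hj : j = 0 := by
        cases j with
        | zero => rfl
        | succ j => exact absurd hz (pvReach_succ m chars j c _ hr).1
      subst hj; subst hz
      constructor
      · intro _; rw [hdrop]; simp [pvLoopA]
      · omega
    · cases j with
      | zero => exact absurd ((pvReach_zero m chars c _).1 hr) hz
      | succ j =>
        obtain ⟨_, st', hit, hr'⟩ := pvReach_succ m chars j c _ hr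
        have hst := pvIter_step m chars c _ st' hit hz
        have hmod : i % chars.length = i := Nat.mod_eq_of_lt hiL
        have hch : chars.getD (i % chars.length) ' ' = chars[i] := by
          rw [hmod]; exact List.getD_eq_getElem chars ' ' hiL
        have hstep : pvLoopA m (chars.drop i) n c
            = pvLoopA m (chars.drop (i + 1)) (n + 1)
                (((pvLookup m c).getD []).getD (if chars[i] = 'L' then 0 else 1) "") := by
          rw [hdrop]; simp [pvLoopA, hz]
        have hr'' : pvReach m chars j
            ((((pvLookup m c).getD []).getD (if chars[i] = 'L' then 0 else 1) ""),
              (i + 1) % chars.length) = true := by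
          rw [hst] at hr'; rw [hch] at hr'; rwa [hmod] at hr'
        obtain ⟨h1, h2⟩ := ih (i + 1) (by omega) j _ (n + 1) hr''
        constructor
        · intro hlt
          rw [hstep, h1 (by omega)]
          congr 1; push_cast; ring
        · intro hle
          obtain ⟨c', hc', hrc⟩ := h2 (by omega)
          refine ⟨c', ?_, ?_⟩
          · rw [hstep, hc']; congr 2; push_cast; ring
          · have : j + 1 - (d + 1) = j - d := by omega
            rwa [this]

-- A's outer recursion sweeps the instruction repeatedly
theorem pvGoA_eq (m : List (String × List String)) (chars : List Char)
    (hL : chars.length ≠ 0) :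
    ∀ (fuel j : Nat) (c : String) (n : Int), j < fuel * chars.length →
      pvReach m chars j (c, 0) = true →
      pvGoA m chars fuel n c = n + (j : Int) := by
  intro fuel
  induction fuel with
  | zero => intro j c n h; omega
  | succ fuel ih =>
    intro j c n hj hr
    have h0 : (0 : Nat) % chars.length = 0 := Nat.zero_mod _
    obtain ⟨h1, h2⟩ := pvLoopA_eq m chars hL chars.length 0 (by omega) j c n (by rwa [h0])
    rw [List.drop_zero] at h1 h2
    by_cases hlt : j < chars.length
    · have := h1 hlt
      simp [pvGoA, this]
    · obtain ⟨c', hc', hrc⟩ := h2 (by omega)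
      have : pvGoA m chars (fuel + 1) n c = pvGoA m chars fuel (n + (chars.length : Int)) c' := by
        simp [pvGoA, hc']
      rw [this, ih (j - chars.length) c' _
        (by have he : (fuel + 1) * chars.length = fuel * chars.length + chars.length := by ring
            omega) hrc]
      have hle : chars.length ≤ j := by omega
      push_cast [Nat.cast_sub hle]; ring

theorem pvReach_succ_eq (m : List (String × List String)) (chars : List Char) (k : Nat)
    (st st' : String × Nat) (h : pvIter m chars (some st) = some st') :
    pvReach m chars (k + 1) st = pvReach m chars k st' := by
  unfold pvReach
  rw [Function.iterate_succ_apply, h]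

theorem pvAbs_none (m : List (String × List String)) (chars : List Char) (k : Nat) :
    (pvAbs m chars)^[k] none = none :=
  Function.iterate_fixed rfl k

theorem pvAbs_iff (m : List (String × List String)) (chars : List Char) :
    ∀ (N : Nat) (st : String × Nat),
      ((pvAbs m chars)^[N] (some st)).elim false (fun p => p.1 == "ZZZ") = true ↔
      ∃ k ≤ N, pvReach m chars k st = true := by
  intro N
  induction N with
  | zero =>
    intro ⟨c, i⟩
    constructor
    · intro h; exact ⟨0, le_refl 0, by unfold pvReach; simpa using h⟩
    · rintro ⟨k, hk, hr⟩
      have : k = 0 := by omega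
      subst this
      unfold pvReach at hr; simpa using hr
  | succ N ih =>
    intro ⟨c, i⟩
    rw [Function.iterate_succ_apply]
    by_cases hz : c = "ZZZ"
    · subst hz
      have habs : pvAbs m chars (some ("ZZZ", i)) = some ("ZZZ", i) := by simp [pvAbs]
      rw [habs]
      constructor
      · intro _; exact ⟨0, by omega, (pvReach_zero m chars "ZZZ" i).2 rfl⟩
      · intro _; exact (ih ("ZZZ", i)).2 ⟨0, by omega, (pvReach_zero m chars "ZZZ" i).2 rfl⟩
    · have habs : pvAbs m chars (some (c, i)) = pvIter m chars (some (c, i)) := by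
        simp [pvAbs, hz]
      rw [habs]
      cases hit : pvIter m chars (some (c, i)) with
      | none =>
        rw [pvAbs_none]
        simp only [Option.elim]
        constructor
        · intro h; simp at h
        · rintro ⟨k, hk, hr⟩
          cases k with
          | zero => exact absurd ((pvReach_zero m chars c i).1 hr) hz
          | succ k =>
            obtain ⟨-, st', hit', -⟩ := pvReach_succ m chars k c i hr
            rw [hit] at hit'; exact absurd hit' (by simp)
      | some st' =>
        rw [ih st']
        constructor
        · rintro ⟨k, hk, hr⟩
          exact ⟨k + 1, by omega, by rwa [pvReach_succ_eq m chars k (c, i) st' hit]⟩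
        · rintro ⟨k, hk, hr⟩
          cases k with
          | zero => exact absurd ((pvReach_zero m chars c i).1 hr) hz
          | succ k =>
            rw [pvReach_succ_eq m chars k (c, i) st' hit] at hr
            exact ⟨k, by omega, hr⟩

-- ===== VERDICT (by name: the statement is the Claim_ definition above) =====
theorem count_steps_spec : Claim_equal_count_steps := by
  intro instruction m n current _ hpre
  obtain ⟨hL, habs⟩ := hpre
  obtain ⟨k, hkle, hr⟩ := (pvAbs_iff m instruction.toList (pvSteps instruction.toList m) (current, 0)).1 habs
  have hk : k < pvFuel instruction.toList m := by unfold pvFuel; omega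
  unfold Spec_count_steps count_steps count_steps_alt
  rw [pvGoA_eq m instruction.toList hL _ k current n
      (lt_of_lt_of_le hk (Nat.le_mul_of_pos_right _ (by omega))) hr,
    pvGoB_eq m instruction.toList hL k _ current 0 n hk (by rwa [Nat.zero_mod])]
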